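-- pv_equiv track=rewrite | github.com/T1n777/Price-Tracker | tracker/scraper.py | get_asin
-- ===== SOURCE A (Python) =====
-- def get_asin(url: str) -> str:
--     """Extract ASIN from Amazon URL."""
--     if "/dp/" in url:
--         return url.split("/dp/")[1].split("/")[0]
--     elif "/gp/" in url:
--         for part in url.split("/"):
--             if len(part) == 10:
--                 return part
--     return None
-- ===== SOURCE B (Python) =====
-- def get_asin(url: str) -> str:
--     """Extract ASIN from Amazon URL."""
--     i = url.find("/dp/")
--     if i != -1:
--         j = url.find("/", i + 4)
--         return url[i + 4:] if j == -1 else url[i + 4:j]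
--     if "/gp/" in url:
--         seg = []
--         for ch in url:
--             if ch == "/":
--                 if len(seg) == 10:
--                     return "".join(seg)
--                 seg = []
--             else:
--                 seg.append(ch)
--         if len(seg) == 10:
--             return "".join(seg)
--     return None
-- ===== Notes on version B (the rewrite author's own statement) =====
-- stated objective: alternative
-- what changed: A works by repeatedly calling str.split and indexing/scanning the resulting piece lists; B instead locates the dp marker with find() and slices the ASIN out directly, and finds the first 10-character slash-delimited segment with a single character-level scan carrying a segment accumulator, never materialising any split list.
import Mathlib
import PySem

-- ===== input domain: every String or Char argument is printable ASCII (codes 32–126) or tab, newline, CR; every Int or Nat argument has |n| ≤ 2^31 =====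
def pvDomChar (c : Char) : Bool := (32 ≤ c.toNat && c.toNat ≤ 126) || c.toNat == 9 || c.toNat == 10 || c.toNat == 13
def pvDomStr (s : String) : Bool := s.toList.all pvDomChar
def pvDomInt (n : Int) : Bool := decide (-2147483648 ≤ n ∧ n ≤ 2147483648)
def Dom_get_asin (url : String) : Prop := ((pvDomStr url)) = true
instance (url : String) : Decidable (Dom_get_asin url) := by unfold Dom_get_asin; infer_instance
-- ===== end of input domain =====

-- B replaces A's two split-chains by a find/slice extraction for "/dp/" and a single
-- character-level scan for the "/gp/" segment search (objective: alternative).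

-- ===== PORT A =====
-- Transliteration of Source A. Python's str.split(sep) is PySem.Chars.splitOn; the indexings
-- [1] and [0] are always in range where they occur (splitting on a separator contained in
-- the string yields ≥ 2 pieces; split always yields ≥ 1 piece), so getD's default is unreachable.
def get_asin (url : String) : Option String :=
  if PySem.Str.isIn "/dp/" url then
    some (String.ofList ((PySem.Chars.splitOn
      ((PySem.Chars.splitOn url.toList "/dp/".toList).getD 1 []) "/".toList).getD 0 []))
  else if PySem.Str.isIn "/gp/" url then
    match (PySem.Chars.splitOn url.toList "/".toList).find? (fun part => part.length == 10) with
    | some part => some (String.ofList part)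
    | none => none
  else none

-- ===== PORT B =====
-- the for-loop of Source B over the characters, with its `seg` accumulator
def gpScan : List Char → List Char → Option String
  | [], seg => if seg.length == 10 then some (String.ofList seg) else none
  | c :: rest, seg =>
    if c == '/' then
      if seg.length == 10 then some (String.ofList seg) else gpScan rest []
    else gpScan rest (seg ++ [c])

def get_asin_alt (url : String) : Option String :=
  let i := PySem.Str.find url "/dp/"
  if i != -1 then
    let j := PySem.Str.findFrom url "/" (i + 4)
    some (if j == -1 then PySem.Str.slice url (some (i + 4)) none
          else PySem.Str.slice url (some (i + 4)) (some j))
  else if PySem.Str.isIn "/gp/" url then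
    gpScan url.toList []
  else none

-- ===== PRECONDITION & SPEC =====
def Spec_get_asin (url : String) (out : Option String) : Prop := out = get_asin_alt url
instance (url : String) (out : Option String) : Decidable (Spec_get_asin url out) := by unfold Spec_get_asin; infer_instance

-- ===== CLAIM (what is proved, stated in full; the proofs are below) =====
def Claim_equal_get_asin : Prop := ∀ (url : String), Dom_get_asin url → Spec_get_asin url (get_asin url)

-- ===== LEMMAS AND PROOFS =====

def splitF (sep l cur : List Char) : List (List Char) :=
  if h : sep ≠ [] ∧ sep.isPrefixOf l then
    cur :: splitF sep (l.drop sep.length) []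
  else
    match l with
    | [] => [cur]
    | c :: rest => splitF sep rest (cur ++ [c])
termination_by l.length
decreasing_by
  · have h1 := (List.isPrefixOf_iff_prefix.mp h.2).length_le
    have h2 : 1 ≤ sep.length := by
      cases sep with
      | nil => exact absurd rfl h.1
      | cons a t => simp
    simp only [List.length_drop]
    omega
  · simp

theorem splitF_nil (sep cur : List Char) : splitF sep [] cur = [cur] := by
  rw [splitF]
  split
  · rename_i h
    have : sep = [] := by
      have := List.isPrefixOf_iff_prefix.mp h.2
      simpa using this
    exact absurd this h.1
  · rfl

theorem splitF_pos (sep l cur : List Char) (hsep : sep ≠ []) (hp : sep.isPrefixOf l) :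
    splitF sep l cur = cur :: splitF sep (l.drop sep.length) [] := by
  rw [splitF, dif_pos ⟨hsep, hp⟩]

theorem splitF_neg_cons (sep : List Char) (c : Char) (rest cur : List Char)
    (hp : ¬ sep.isPrefixOf (c :: rest)) :
    splitF sep (c :: rest) cur = splitF sep rest (cur ++ [c]) := by
  rw [splitF, dif_neg (by simp [hp])]

theorem splitOn_go_eq (sep : List Char) (hsep : sep ≠ []) :
    ∀ fuel l cur acc, l.length < fuel →
      PySem.Chars.splitOn.go sep fuel l cur acc = acc.reverse ++ splitF sep l cur.reverse := by
  intro fuel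
  induction fuel with
  | zero => intro l cur acc h; omega
  | succ fuel ih =>
    intro l cur acc h
    cases l with
    | nil =>
      rw [PySem.Chars.splitOn.go]
      rw [splitF_nil]
      simp
      omega
    | cons c rest =>
      rw [PySem.Chars.splitOn.go]
      have h2 : 1 ≤ sep.length := by
        cases sep with
        | nil => exact absurd rfl hsep
        | cons a t => simp
      by_cases hp : sep.isPrefixOf (c :: rest)
      · simp only [hp, if_true]
        have hlt : (List.drop sep.length (c :: rest)).length < fuel := by
          have hd : (List.drop sep.length (c :: rest)).length = (c :: rest).length - sep.length :=
            List.length_drop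
          simp at h
          simp [hd]
          omega
        rw [ih _ _ _ hlt, splitF_pos sep _ _ hsep hp]
        simp
      · simp only [hp]
        have hlt : rest.length < fuel := by simp at h; omega
        rw [ih rest (c :: cur) acc hlt, splitF_neg_cons sep c rest _ hp]
        simp

theorem splitOn_eq (l sep : List Char) (hsep : sep ≠ []) :
    PySem.Chars.splitOn l sep = splitF sep l [] := by
  have := splitOn_go_eq sep hsep (l.length + 1) l [] [] (by omega)
  simpa [PySem.Chars.splitOn] using this

-- the chars of l before its first occurrence of sep (all of l if none)
def preF (sep : List Char) : List Char → List Char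
  | [] => []
  | c :: rest => if sep.isPrefixOf (c :: rest) then [] else c :: preF sep rest

-- the pieces of l after its first occurrence of sep ([] if none)
def sufF (sep : List Char) : List Char → List (List Char)
  | [] => []
  | c :: rest =>
    if sep.isPrefixOf (c :: rest) then splitF sep ((c :: rest).drop sep.length) []
    else sufF sep rest

theorem splitF_eq_pre_suf (sep : List Char) (hsep : sep ≠ []) :
    ∀ l cur, splitF sep l cur = (cur ++ preF sep l) :: sufF sep l := by
  intro l
  induction l with
  | nil => intro cur; simp [splitF_nil, preF, sufF]
  | cons c rest ih =>
    intro cur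
    by_cases hp : sep.isPrefixOf (c :: rest)
    · rw [splitF_pos sep _ _ hsep hp]
      simp [preF, sufF, hp]
    · rw [splitF_neg_cons sep c rest _ hp, ih]
      simp [preF, sufF, hp]

theorem splitF_skip (sep : List Char) (hsep : sep ≠ []) :
    ∀ (k : Nat) (l cur : List Char), (∀ j < k, ¬ sep.isPrefixOf (l.drop j)) →
      sep.isPrefixOf (l.drop k) →
      splitF sep l cur = (cur ++ l.take k) :: splitF sep (l.drop (k + sep.length)) [] := by
  intro k
  induction k with
  | zero =>
    intro l cur hmin hk
    simp only [List.drop_zero] at hk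
    rw [splitF_pos sep _ _ hsep hk]
    simp
  | succ k ih =>
    intro l cur hmin hk
    cases l with
    | nil =>
      exfalso
      simp only [List.drop_nil] at hk
      have := List.isPrefixOf_iff_prefix.mp hk
      simp at this
      exact hsep this
    | cons c rest =>
      have h0 : ¬ sep.isPrefixOf (c :: rest) := by
        have := hmin 0 (by omega)
        simpa using this
      rw [splitF_neg_cons sep c rest _ h0]
      rw [ih rest (cur ++ [c]) (fun j hj => by simpa using hmin (j+1) (by omega)) (by simpa using hk)]
      have hdrop : List.drop (k + 1 + sep.length) (c :: rest) = List.drop (k + sep.length) rest := by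
        have hh : k + 1 + sep.length = (k + sep.length) + 1 := by omega
        rw [hh, List.drop_succ_cons]
      rw [hdrop, List.take_succ_cons]
      simp

-- singleton prefix of a drop reads off one character
theorem singleton_prefix_drop (a : Char) (l : List Char) (i : Nat) :
    [a].isPrefixOf (l.drop i) = true ↔ l[i]? = some a := by
  rw [List.isPrefixOf_iff_prefix]
  cases hd : l.drop i with
  | nil =>
    simp
    rw [← List.head?_drop, hd]
    simp
  | cons x t =>
    constructor
    · intro hp
      obtain ⟨u, hu⟩ := hp
      rw [← List.head?_drop, hd]
      simp at hu
      simp [hu.1]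
    · intro hx
      rw [← List.head?_drop, hd] at hx
      simp at hx
      exact ⟨t, by simp [hx]⟩

-- preF with the single-character separator "/" is takeWhile (· ≠ '/')
theorem preF_slash (l : List Char) : preF ['/'] l = l.takeWhile (fun c => c ≠ '/') := by
  induction l with
  | nil => simp [preF]
  | cons c rest ih =>
    by_cases hc : c = '/'
    · subst hc
      have : (['/'] : List Char).isPrefixOf ('/' :: rest) = true := by simp [List.isPrefixOf]
      simp [preF, this, List.takeWhile]
    · have : (['/'] : List Char).isPrefixOf (c :: rest) = false := by
        simp [List.isPrefixOf]
        exact fun h => hc h.symm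
      simp [preF, this, List.takeWhile, hc, ih]

-- cutting at '/' ignores everything from the first occurrence of a '/'-initial separator on
theorem takeWhile_preF (sep' b : List Char) :
    (preF ('/' :: sep') b).takeWhile (fun c => c ≠ '/') = b.takeWhile (fun c => c ≠ '/') := by
  induction b with
  | nil => simp [preF]
  | cons c rest ih =>
    by_cases hp : ('/' :: sep').isPrefixOf (c :: rest)
    · have hc : c = '/' := by
        have := List.isPrefixOf_iff_prefix.mp hp
        obtain ⟨u, hu⟩ := this
        simp at hu
        exact hu.1.symm
      subst hc
      simp [preF, hp, List.takeWhile]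
    · by_cases hc : c = '/'
      · subst hc
        simp [preF, hp, List.takeWhile]
      · have hpre : preF ('/' :: sep') (c :: rest) = c :: preF ('/' :: sep') rest := by
          simp [preF, hp]
        rw [hpre, List.takeWhile_cons, List.takeWhile_cons]
        simp only [ne_eq, decide_not] at ih
        simp [hc, ih]

-- take up to the first '/' is takeWhile (· ≠ '/')
theorem take_eq_takeWhile :
    ∀ (b : List Char) (m : Nat), (∀ j < m, b[j]? ≠ some '/') → b[m]? = some '/' →
      b.take m = b.takeWhile (fun c => c ≠ '/') := by
  intro b
  induction b with
  | nil => intro m _ hm; simp at hm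
  | cons c rest ih =>
    intro m hmin hm
    cases m with
    | zero =>
      simp at hm
      simp [List.takeWhile, hm]
    | succ m =>
      have hc : c ≠ '/' := by
        have := hmin 0 (by omega)
        simpa using this
      rw [List.take_succ_cons]
      have := ih m (fun j hj => by simpa using hmin (j+1) (by omega)) (by simpa using hm)
      simp [List.takeWhile, hc, this]

theorem takeWhile_of_no_slash (b : List Char) (h : '/' ∉ b) :
    b.takeWhile (fun c => c ≠ '/') = b := by
  rw [List.takeWhile_eq_self_iff]
  intro c hc
  simp
  intro hcc
  exact h (hcc ▸ hc)

theorem gpScan_eq (l : List Char) : ∀ seg,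
    gpScan l seg = (match (splitF ['/'] l seg).find? (fun part => part.length == 10) with
                    | some part => some (String.ofList part)
                    | none => none) := by
  induction l with
  | nil =>
    intro seg
    rw [splitF_nil]
    simp only [gpScan, List.find?_singleton]
    by_cases h10 : seg.length = 10
    · simp [h10]
    · simp [h10]
  | cons c rest ih =>
    intro seg
    by_cases hc : c = '/'
    · subst hc
      have hp : (['/'] : List Char).isPrefixOf ('/' :: rest) = true := by simp [List.isPrefixOf]
      rw [splitF_pos _ _ _ (by simp) hp]
      simp only [List.length_cons, List.length_nil, List.drop_succ_cons, List.drop_zero]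
      rw [List.find?_cons]
      by_cases h10 : seg.length = 10
      · simp [gpScan, h10]
      · simp only [gpScan, if_true, beq_self_eq_true]
        have hb : (seg.length == 10) = false := by simp [h10]
        simp [hb, ih]
    · have hp : ¬ (['/'] : List Char).isPrefixOf (c :: rest) = true := by
        simp [List.isPrefixOf]
        exact fun h => hc h.symm
      rw [splitF_neg_cons _ _ _ _ hp]
      simp only [gpScan]
      have : (c == '/') = false := by simp [hc]
      simp [this, ih]

theorem dp_lists (u : List Char) (hdp : PySem.Chars.find u "/dp/".toList ≠ -1) :
    (PySem.Chars.splitOn ((PySem.Chars.splitOn u "/dp/".toList).getD 1 []) "/".toList).getD 0 []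
      =
    (if PySem.Chars.findFrom u "/".toList (PySem.Chars.find u "/dp/".toList + 4) == -1 then
       PySem.List.slice u (some (PySem.Chars.find u "/dp/".toList + 4)) none
     else
       PySem.List.slice u (some (PySem.Chars.find u "/dp/".toList + 4))
         (some (PySem.Chars.findFrom u "/".toList (PySem.Chars.find u "/dp/".toList + 4)))) := by
  have hsep : ("/dp/".toList : List Char) ≠ [] := by decide
  have hge : 0 ≤ PySem.Chars.find u "/dp/".toList := by
    have := PySem.Chars.neg_one_le_find u "/dp/".toList
    omega
  set i := PySem.Chars.find u "/dp/".toList with hi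
  set k := i.toNat with hk
  have hik : i = (k : Int) := by omega
  obtain ⟨hpref, hmin⟩ := PySem.Chars.find_spec hge
  rw [← hi, ← hk] at hpref hmin
  have hlen4 : ("/dp/".toList : List Char).length = 4 := by decide
  have hk4 : k + 4 ≤ u.length := by
    have h1 := hpref.length_le
    rw [hlen4] at h1
    simp only [List.length_drop] at h1
    omega
  set b := u.drop (k + 4) with hb
  -- A side
  have hA : (PySem.Chars.splitOn ((PySem.Chars.splitOn u "/dp/".toList).getD 1 []) "/".toList).getD 0 []
      = b.takeWhile (fun c => c ≠ '/') := by
    rw [splitOn_eq u _ hsep]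
    rw [splitF_skip _ hsep k u []
      (fun j hj hcon => hmin j hj (List.isPrefixOf_iff_prefix.mp hcon))
      (List.isPrefixOf_iff_prefix.mpr hpref)]
    rw [hlen4]
    simp only [List.nil_append, List.getD_cons_succ]
    rw [splitF_eq_pre_suf _ hsep b [], List.getD_cons_zero]
    rw [splitOn_eq _ _ (by decide)]
    rw [splitF_eq_pre_suf _ (by decide) _ []]
    simp only [List.nil_append, List.getD_cons_zero]
    have hdpl : ("/dp/".toList : List Char) = '/' :: "dp/".toList := by decide
    have hsl1 : ("/".toList : List Char) = ['/'] := by decide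
    rw [hsl1, preF_slash, hdpl, takeWhile_preF]
  rw [hA]
  -- B side
  have hcast : i + 4 = ((k + 4 : Nat) : Int) := by omega
  rw [hcast, PySem.Chars.findFrom_natCast u _ (k + 4) hk4]
  by_cases hsl : PySem.Chars.find b "/".toList = -1
  · rw [← hb, hsl]
    simp only [if_true, beq_self_eq_true]
    rw [PySem.List.slice_from_natCast, ← hb]
    apply takeWhile_of_no_slash
    intro hmem
    rw [PySem.Chars.find_eq_neg_one_iff] at hsl
    exact hsl ((List.singleton_infix_iff '/' b).mpr (by simpa using hmem))
  · rw [← hb]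
    have hm0 : 0 ≤ PySem.Chars.find b "/".toList := by
      have := PySem.Chars.neg_one_le_find b "/".toList
      omega
    set m := PySem.Chars.find b "/".toList with hm
    have hmk : m = ((m.toNat : Nat) : Int) := by omega
    have hcond : ((if m = -1 then -1 else ((k + 4 : Nat) : Int) + m) == -1) = false := by
      simp [hsl]
      omega
    rw [hcond]
    simp only [Bool.false_eq_true, reduceIte, hsl]
    rw [hmk, PySem.List.slice_natCast_add, ← hb]
    obtain ⟨hp2, hmin2⟩ := PySem.Chars.find_spec hm0
    rw [← hm] at hp2 hmin2
    have hchar : b[m.toNat]? = some '/' := by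
      rw [← singleton_prefix_drop]
      exact List.isPrefixOf_iff_prefix.mpr (by simpa using hp2)
    have hminc : ∀ j < m.toNat, b[j]? ≠ some '/' := by
      intro j hj hcon
      exact hmin2 j hj (by
        rw [← singleton_prefix_drop] at hcon
        simpa using List.isPrefixOf_iff_prefix.mp hcon)
    exact (take_eq_takeWhile b m.toNat hminc hchar).symm

-- ===== VERDICT (by name: the statement is the Claim_ definition above) =====
theorem get_asin_spec : Claim_equal_get_asin := by
  unfold Claim_equal_get_asin
  intro url _
  unfold Spec_get_asin get_asin get_asin_alt
  show _ = (if (PySem.Str.find url "/dp/" != -1) = true then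
      some (if (PySem.Str.findFrom url "/" (PySem.Str.find url "/dp/" + 4) == -1) = true
            then PySem.Str.slice url (some (PySem.Str.find url "/dp/" + 4)) none
            else PySem.Str.slice url (some (PySem.Str.find url "/dp/" + 4))
                   (some (PySem.Str.findFrom url "/" (PySem.Str.find url "/dp/" + 4))))
    else if PySem.Str.isIn "/gp/" url = true then gpScan url.toList [] else none)
  by_cases hdp : PySem.Chars.find url.toList "/dp/".toList = -1
  · have h1 : PySem.Str.isIn "/dp/" url = false := by
      show (PySem.Chars.find url.toList "/dp/".toList != -1) = false
      rw [hdp]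
      decide
    have h2 : (PySem.Str.find url "/dp/" != -1) = false := by
      show (PySem.Chars.find url.toList "/dp/".toList != -1) = false
      rw [hdp]
      decide
    rw [h1, h2]
    simp only [Bool.false_eq_true, if_false]
    by_cases hgp : PySem.Str.isIn "/gp/" url = true
    · rw [hgp]
      simp only [if_true]
      rw [splitOn_eq _ _ (by decide), gpScan_eq]
      have hs : ("/".toList : List Char) = ['/'] := rfl
      rw [hs]
    · rw [Bool.not_eq_true] at hgp
      rw [hgp]
      simp only [Bool.false_eq_true, if_false]
  · have h1 : PySem.Str.isIn "/dp/" url = true := by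
      show (PySem.Chars.find url.toList "/dp/".toList != -1) = true
      simpa using hdp
    have h2 : (PySem.Str.find url "/dp/" != -1) = true := by
      show (PySem.Chars.find url.toList "/dp/".toList != -1) = true
      simpa using hdp
    rw [h1, h2]
    simp only [if_true]
    show some (String.ofList ((PySem.Chars.splitOn
        ((PySem.Chars.splitOn url.toList "/dp/".toList).getD 1 []) "/".toList).getD 0 []))
      = some (if PySem.Chars.findFrom url.toList "/".toList
                  (PySem.Chars.find url.toList "/dp/".toList + 4) == -1
              then String.ofList (PySem.List.slice url.toList
                    (some (PySem.Chars.find url.toList "/dp/".toList + 4)) none)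
              else String.ofList (PySem.List.slice url.toList
                    (some (PySem.Chars.find url.toList "/dp/".toList + 4))
                    (some (PySem.Chars.findFrom url.toList "/".toList
                      (PySem.Chars.find url.toList "/dp/".toList + 4)))))
    rw [← apply_ite String.ofList]
    exact congrArg (fun l => some (String.ofList l)) (dp_lists url.toList hdp)
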